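-- pv_equiv track=rewrite | github.com/noahfoe/Matroid-Theory-Project | TestMatroidTheory.py | checkFEPTotal
-- ===== SOURCE A (Python) =====
-- def checkFEP(A, B, C):
--     for a in A:
--         for b in B:
--             if (b in A) or (a in B):
--                 continue
--             test = A.difference(set([a])).union(set([b]))
--             if test in C:
--                 return True
--     return False
--
-- def checkFEPTotal(C):
--     for A in C:
--         for B in C:
--             if not B == A:
--                 test = checkFEP(A, B, C)
--                 if not test:
--                     return False
--     return True
-- ===== SOURCE B (Python) =====
-- def checkFEPTotal(C):
--     # For each base A, scan C once to collect all exchange pairs (a, b) such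
--     # that (A - {a}) | {b} is a member of C; then each B only needs one pass
--     # over those pairs instead of re-testing every (a, b) against C.
--     for A in C:
--         pairs = []
--         for S in C:
--             d1 = A - S
--             d2 = S - A
--             if len(d1) == 1 and len(d2) == 1:
--                 (a,), (b,) = d1, d2
--                 pairs.append((a, b))
--         for B in C:
--             if not B == A:
--                 if not any(a not in B and b in B for (a, b) in pairs):
--                     return False
--     return True
-- ===== Notes on version B (the rewrite author's own statement) =====
-- stated objective: faster
-- what changed: Instead of testing every element pair (a,b) of every base pair (A,B) against C, B scans C once per base A to precompute the exchange pairs (a,b) with (A-{a})|{b} in C (each member S of C yields at most one pair, via the two one-element set differences), and then each B is checked with a single pass over that precomputed pair list.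
import Mathlib
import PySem

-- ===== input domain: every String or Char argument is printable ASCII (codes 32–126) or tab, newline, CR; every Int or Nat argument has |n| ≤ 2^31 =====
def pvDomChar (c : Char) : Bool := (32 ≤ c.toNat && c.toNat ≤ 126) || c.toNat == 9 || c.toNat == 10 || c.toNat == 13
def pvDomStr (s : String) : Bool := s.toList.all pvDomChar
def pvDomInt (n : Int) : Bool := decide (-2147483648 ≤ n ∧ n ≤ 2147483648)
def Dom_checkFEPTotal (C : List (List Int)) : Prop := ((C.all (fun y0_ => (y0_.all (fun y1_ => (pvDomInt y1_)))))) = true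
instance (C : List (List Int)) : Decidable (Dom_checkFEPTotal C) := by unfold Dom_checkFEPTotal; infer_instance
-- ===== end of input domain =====

-- B precomputes, per base A, the exchange pairs by one scan of C and checks each B against
-- that list (faster); the equivalence proved is about the return value on duplicate-free lists
-- (valid encodings of Python sets).

-- ===== PORT A =====
-- helper: port of checkFEP(A, B, C)
def pyCheckFEP (A B : List Int) (C : List (List Int)) : Bool :=
  A.any (fun a => B.any (fun b =>
    if PySem.Set.contains A b || PySem.Set.contains B a then false
    else C.any (fun S =>
      PySem.Set.equal
        (PySem.Set.union (PySem.Set.diff A (PySem.Set.ofList [a])) (PySem.Set.ofList [b])) S)))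

def checkFEPTotal (C : List (List Int)) : Bool :=
  C.all (fun A => C.all (fun B =>
    if !(PySem.Set.equal B A) then pyCheckFEP A B C else true))

-- ===== PORT B =====
-- helper: the exchange pairs of base A found by one scan of C
def pvPairs (A : List Int) (C : List (List Int)) : List (Int × Int) :=
  C.filterMap (fun S =>
    match PySem.Set.diff A S, PySem.Set.diff S A with
    | [a], [b] => some (a, b)
    | _, _ => none)

def checkFEPTotal_alt (C : List (List Int)) : Bool :=
  C.all (fun A =>
    let pairs := pvPairs A C
    C.all (fun B =>
      if !(PySem.Set.equal B A) then
        pairs.any (fun p => !(PySem.Set.contains B p.1) && PySem.Set.contains B p.2)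
      else true))

-- ===== PRECONDITION & SPEC =====
-- Pre_ admits exactly the valid encodings of the Python input (a list of SETS): each inner
-- list must be duplicate-free, the invariant of the List-as-set representation.
def Pre_checkFEPTotal (C : List (List Int)) : Prop := ∀ S ∈ C, S.Nodup
instance (C : List (List Int)) : Decidable (Pre_checkFEPTotal C) := by
  unfold Pre_checkFEPTotal; infer_instance

def pvWitness_checkFEPTotal : List (List Int) := [[1, 2], [1, 3], [2, 3]]

def Spec_checkFEPTotal (C : List (List Int)) (out : Bool) : Prop := out = checkFEPTotal_alt C
instance (C : List (List Int)) (out : Bool) : Decidable (Spec_checkFEPTotal C out) := by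
  unfold Spec_checkFEPTotal; infer_instance

-- ===== CLAIM (what is proved, stated in full; the proofs are below) =====
def Claim_equal_checkFEPTotal : Prop :=
  ∀ (C : List (List Int)), Dom_checkFEPTotal C → Pre_checkFEPTotal C →
    Spec_checkFEPTotal C (checkFEPTotal C)

-- ===== LEMMAS AND PROOFS =====

lemma filter_beq_singleton (l : List Int) (a : Int) (hl : l.Nodup) (ha : a ∈ l) :
    l.filter (· == a) = [a] := by
  rw [List.filter_beq, List.count_eq_one_of_mem hl ha]; rfl

lemma diff_eq_singleton_iff (l t : List Int) (a : Int) (hl : l.Nodup) :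
    PySem.Set.diff l t = [a] ↔ (a ∈ l ∧ a ∉ t ∧ ∀ x ∈ l, x ∉ t → x = a) := by
  have hd : PySem.Set.diff l t = l.filter (fun x => !decide (x ∈ t)) := by
    simp [PySem.Set.diff, PySem.Set.contains]
  rw [hd]
  constructor
  · intro h
    have hmem : a ∈ l.filter (fun x => !decide (x ∈ t)) := by rw [h]; simp
    have h1 := List.mem_filter.mp hmem
    refine ⟨h1.1, by simpa using h1.2, ?_⟩
    intro x hx hxt
    have : x ∈ l.filter (fun x => !decide (x ∈ t)) :=
      List.mem_filter.mpr ⟨hx, by simpa using hxt⟩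
    rw [h] at this; simpa using this
  · rintro ⟨ha, hat, huniq⟩
    have hc : ∀ x ∈ l, (!decide (x ∈ t)) = (x == a) := by
      intro x hx
      by_cases hxt : x ∈ t
      · have h2 : x ≠ a := fun he => hat (he ▸ hxt)
        simp [hxt, h2]
      · simp [huniq x hx hxt, hat]
    rw [List.filter_congr hc]
    exact filter_beq_singleton l a hl ha

lemma equal_test_iff (A S : List Int) (a b : Int) (hA : A.Nodup) (hS : S.Nodup)
    (ha : a ∈ A) (hb : b ∉ A) :
    (PySem.Set.equal
        (PySem.Set.union (PySem.Set.diff A (PySem.Set.ofList [a])) (PySem.Set.ofList [b])) S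
      = true)
    ↔ (PySem.Set.diff A S = [a] ∧ PySem.Set.diff S A = [b]) := by
  rw [PySem.Set.equal_iff]
  have hmem : ∀ x : Int,
      (x ∈ PySem.Set.union (PySem.Set.diff A (PySem.Set.ofList [a])) (PySem.Set.ofList [b])
        ↔ ((x ∈ A ∧ x ≠ a) ∨ x = b)) := by
    intro x
    simp [PySem.Set.mem_union, PySem.Set.mem_diff, PySem.Set.mem_ofList]
  rw [diff_eq_singleton_iff A S a hA, diff_eq_singleton_iff S A b hS]
  constructor
  · intro h
    have hab : a ≠ b := fun he => hb (he ▸ ha)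
    have haS : a ∉ S := by
      intro haS
      have := ((h a).mpr haS)
      rw [hmem] at this
      rcases this with ⟨_, h2⟩ | h2
      · exact h2 rfl
      · exact hab h2
    have hbS : b ∈ S := by
      refine (h b).mp ?_
      rw [hmem]; exact Or.inr rfl
    refine ⟨⟨ha, haS, ?_⟩, ⟨hbS, hb, ?_⟩⟩
    · intro x hx hxS
      by_contra hne
      exact hxS ((h x).mp ((hmem x).mpr (Or.inl ⟨hx, hne⟩)))
    · intro x hxS hxA
      have := (h x).mpr hxS
      rw [hmem] at this
      rcases this with ⟨h1, _⟩ | h1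
      · exact absurd h1 hxA
      · exact h1
  · rintro ⟨⟨_, haS, huA⟩, ⟨hbS, _, huS⟩⟩
    intro x
    rw [hmem]
    constructor
    · rintro (⟨hxA, hxa⟩ | rfl)
      · by_contra hxS
        exact hxa (huA x hxA hxS)
      · exact hbS
    · intro hxS
      by_cases hxA : x ∈ A
      · exact Or.inl ⟨hxA, fun he => haS (he ▸ hxS)⟩
      · exact Or.inr (huS x hxS hxA)

lemma mem_pvPairs (A : List Int) (C : List (List Int)) (a b : Int) :
    (a, b) ∈ pvPairs A C ↔ ∃ S ∈ C, PySem.Set.diff A S = [a] ∧ PySem.Set.diff S A = [b] := by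
  unfold pvPairs
  rw [List.mem_filterMap]
  constructor
  · rintro ⟨S, hS, hsome⟩
    refine ⟨S, hS, ?_⟩
    revert hsome
    rcases h1 : PySem.Set.diff A S with _ | ⟨x, _ | ⟨y, t⟩⟩ <;>
      rcases h2 : PySem.Set.diff S A with _ | ⟨u, _ | ⟨v, s⟩⟩ <;>
        simp_all
  · rintro ⟨S, hS, h1, h2⟩
    exact ⟨S, hS, by rw [h1, h2]⟩

lemma fep_eq (A B : List Int) (C : List (List Int)) (hA : A.Nodup) (hC : ∀ S ∈ C, S.Nodup) :
    pyCheckFEP A B C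
      = (pvPairs A C).any (fun p => !(PySem.Set.contains B p.1) && PySem.Set.contains B p.2) := by
  rw [Bool.eq_iff_iff]
  simp only [pyCheckFEP, List.any_eq_true]
  constructor
  · rintro ⟨a, haA, b, hbB, hbody⟩
    by_cases hcond : (PySem.Set.contains A b || PySem.Set.contains B a) = true
    · rw [if_pos hcond] at hbody; exact absurd hbody (by simp)
    · rw [if_neg hcond] at hbody
      have hcond' : b ∉ A ∧ a ∉ B := by
        simpa [PySem.Set.contains, not_or] using hcond
      obtain ⟨S, hS, heq⟩ := List.any_eq_true.mp hbody
      have hd := (equal_test_iff A S a b hA (hC S hS) haA hcond'.1).mp heq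
      refine ⟨(a, b), (mem_pvPairs A C a b).mpr ⟨S, hS, hd⟩, ?_⟩
      simp [PySem.Set.contains, hcond'.2, hbB]
  · rintro ⟨⟨a, b⟩, hp, hpred⟩
    obtain ⟨S, hS, h1, h2⟩ := (mem_pvPairs A C a b).mp hp
    obtain ⟨haA, haS, _⟩ := (diff_eq_singleton_iff A S a hA).mp h1
    obtain ⟨hbS, hbA, _⟩ := (diff_eq_singleton_iff S A b (hC S hS)).mp h2
    have hpred' : a ∉ B ∧ b ∈ B := by
      simpa [PySem.Set.contains, Bool.and_eq_true] using hpred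
    refine ⟨a, haA, b, hpred'.2, ?_⟩
    rw [if_neg (by simpa [PySem.Set.contains, not_or] using ⟨hbA, hpred'.1⟩)]
    exact List.any_eq_true.mpr ⟨S, hS, (equal_test_iff A S a b hA (hC S hS) haA hbA).mpr ⟨h1, h2⟩⟩

lemma all_congr_mem {α : Type} (l : List α) (f g : α → Bool) (h : ∀ x ∈ l, f x = g x) :
    l.all f = l.all g := by
  induction l with
  | nil => rfl
  | cons x xs ih =>
    simp only [List.all_cons, h x (List.mem_cons_self),
      ih (fun y hy => h y (List.mem_cons_of_mem x hy))]

-- ===== VERDICT (by name: the statement is the Claim_ definition above) =====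
theorem checkFEPTotal_spec : Claim_equal_checkFEPTotal := by
  intro C _dom hPre
  unfold Spec_checkFEPTotal checkFEPTotal checkFEPTotal_alt
  refine all_congr_mem C _ _ ?_
  intro A hA
  dsimp only
  refine all_congr_mem C _ _ ?_
  intro B _
  rw [fep_eq A B C (hPre A hA) hPre]
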